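-- pv_equiv track=rewrite | github.com/moomoo-95/programmers | Practice problem/Watermelon/Watermelon.py | solution
-- ===== SOURCE A (Python) =====
-- def solution(n):
--     answer = ''
--     for i in range(n) :
--         if i % 2 == 0 :
--             answer = answer + '수'
--         else :
--             answer = answer + '박'
--     return answer
-- ===== SOURCE B (Python) =====
-- def solution(n):
--     m = max(n, 0)
--     return '수박' * (m // 2) + '수' * (m % 2)
-- ===== Notes on version B (the rewrite author's own statement) =====
-- stated objective: faster
-- what changed: Replaces the per-index loop with its parity branch by a closed-form expression: clamp negative n to empty, then repeat the two-character pair and append the optional odd trailing character once.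
import Mathlib
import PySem

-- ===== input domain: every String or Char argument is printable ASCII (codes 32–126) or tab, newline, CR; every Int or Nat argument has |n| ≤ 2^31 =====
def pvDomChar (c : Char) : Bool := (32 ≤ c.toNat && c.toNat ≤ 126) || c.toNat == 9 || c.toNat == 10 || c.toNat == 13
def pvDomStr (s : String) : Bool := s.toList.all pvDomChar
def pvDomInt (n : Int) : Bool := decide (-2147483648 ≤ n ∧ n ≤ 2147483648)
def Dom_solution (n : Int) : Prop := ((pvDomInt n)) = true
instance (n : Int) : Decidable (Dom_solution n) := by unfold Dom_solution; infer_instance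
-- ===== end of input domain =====

-- B replaces A's per-index loop and parity branch by a closed form: '수박' * (m // 2) + '수' * (m % 2) with m = max(n, 0).

-- ===== PORT A =====
-- A builds the answer character by character over range(n); ported over List Char
-- (Python string concatenation = list append), packed into a String at the end.
def solution (n : Int) : String :=
  String.ofList ((PySem.List.pyRange 0 n 1).foldl
    (fun answer i => if PySem.Int.mod i 2 = 0 then answer ++ ['수'] else answer ++ ['박']) [])

-- ===== PORT B =====
def solution_alt (n : Int) : String :=
  let m := max n 0
  String.ofList (PySem.List.pyRepeat ['수', '박'] (PySem.Int.floordiv m 2)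
             ++ PySem.List.pyRepeat ['수'] (PySem.Int.mod m 2))

-- ===== PRECONDITION & SPEC =====
def Spec_solution (n : Int) (out : String) : Prop := out = solution_alt n
instance (n : Int) (out : String) : Decidable (Spec_solution n out) := by unfold Spec_solution; infer_instance

-- ===== CLAIM (what is proved, stated in full; the proofs are below) =====
def Claim_equal_solution : Prop := ∀ (n : Int), Dom_solution n → Spec_solution n (solution n)

-- ===== LEMMAS AND PROOFS =====

theorem loop_closed (k : Nat) :
    (PySem.List.pyRange 0 (k : Int) 1).foldl
      (fun answer i => if PySem.Int.mod i 2 = 0 then answer ++ ['수'] else answer ++ ['박']) []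
    = (List.replicate (k / 2) ['수', '박']).flatten ++ List.replicate (k % 2) '수' := by
  induction k with
  | zero => simp [PySem.List.pyRange_one_eq_nil]
  | succ k ih =>
    have hsplit : PySem.List.pyRange 0 ((k : Int) + 1) 1
        = PySem.List.pyRange 0 (k : Int) 1 ++ [(k : Int)] := by
      exact PySem.List.pyRange_one_succ_right (by positivity)
    have hcast : ((k + 1 : Nat) : Int) = (k : Int) + 1 := by push_cast; ring
    rw [hcast, hsplit, List.foldl_append, ih]
    have hmod : PySem.Int.mod (k : Int) 2 = ((k % 2 : Nat) : Int) := by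
      simp only [PySem.Int.mod, Int.fmod_eq_emod]
      omega
    simp only [List.foldl_cons, List.foldl_nil, hmod]
    rcases Nat.even_or_odd k with he | ho
    · have h2 : k % 2 = 0 := Nat.even_iff.mp he
      have hd : (k + 1) / 2 = k / 2 := by omega
      have hm : (k + 1) % 2 = 1 := by omega
      rw [h2, hd, hm]
      simp
    · have h2 : k % 2 = 1 := Nat.odd_iff.mp ho
      have hd : (k + 1) / 2 = k / 2 + 1 := by omega
      have hm : (k + 1) % 2 = 0 := by omega
      rw [h2, hd, hm]
      norm_num [List.replicate_succ', List.flatten_append]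

-- ===== VERDICT (by name: the statement is the Claim_ definition above) =====
theorem solution_spec : Claim_equal_solution := by
  intro n _
  unfold Spec_solution solution solution_alt
  by_cases hle : n ≤ 0
  · rw [PySem.List.pyRange_one_eq_nil hle]
    have hm : max n 0 = 0 := by omega
    simp [hm, PySem.List.pyRepeat, PySem.Int.floordiv, PySem.Int.mod]
  · have hpos : 0 < n := by omega
    have hm : max n 0 = n := by omega
    have hn : ((n.toNat : Nat) : Int) = n := Int.toNat_of_nonneg hpos.le
    rw [hm, ← hn, loop_closed]
    congr 1
    have hfd : (max n 0).fdiv 2 = max n 0 / 2 := by rw [Int.fdiv_eq_ediv]; simp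
    have h1 : (max n 0 / 2).toNat = n.toNat / 2 := by omega
    have h2 : (max n 0 % 2).toNat = n.toNat % 2 := by omega
    simp [PySem.List.pyRepeat, PySem.Int.floordiv, PySem.Int.mod, Int.fmod_eq_emod,
          hfd, h1, h2, List.flatten_replicate_singleton]
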